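-- pv_equiv track=rewrite | github.com/thinkSharp/interviewsBit | redundant_braces_count.py | reverse_pop_until_key
-- ===== SOURCE A (Python) =====
-- from collections import deque
--
-- def reverse_pop_until_key(stack, key):
--     d = deque(stack)
--     last_pop = ''
--     while d:
--         pop_element = d.pop()
--         if pop_element == key :
--             return list(d),0
--         elif pop_element == '(' and last_pop == ')':
--             return list(d),1
--         last_pop = pop_element
--
--     return list(d),0
-- ===== SOURCE B (Python) =====
-- def reverse_pop_until_key(stack, key):
--     s = list(stack)
--     n = len(s)
--     best = None
--     for i in range(n):
--         if s[i] == key: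
--             best = (i, 0)
--         elif s[i] == '(' and i + 1 < n and s[i + 1] == ')':
--             best = (i, 1)
--     if best is None:
--         return [], 0
--     return s[:best[0]], best[1]
-- ===== Notes on version B (the rewrite author's own statement) =====
-- stated objective: alternative
-- what changed: Replaces the deque right-to-left popping loop with state last_pop by a single forward index scan that overwrites a best-match record (index, code), returning one slice at the end; the rightmost recorded match equals A's first match from the right.
import Mathlib
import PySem

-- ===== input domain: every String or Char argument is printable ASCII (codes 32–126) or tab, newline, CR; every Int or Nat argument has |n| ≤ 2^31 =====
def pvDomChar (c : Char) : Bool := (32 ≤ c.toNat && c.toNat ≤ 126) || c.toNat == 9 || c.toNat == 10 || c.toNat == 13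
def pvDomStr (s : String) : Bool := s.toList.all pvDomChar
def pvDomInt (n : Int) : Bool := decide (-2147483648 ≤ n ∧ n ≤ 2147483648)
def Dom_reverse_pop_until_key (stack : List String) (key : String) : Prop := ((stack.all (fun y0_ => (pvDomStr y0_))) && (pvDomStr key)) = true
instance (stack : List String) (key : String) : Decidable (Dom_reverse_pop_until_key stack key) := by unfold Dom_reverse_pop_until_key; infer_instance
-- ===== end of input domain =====

-- B replaces A's right-to-left deque popping (with last_pop state) by a single forward index
-- scan recording the rightmost match, then one slice; same O(n) cost, different decomposition.

-- ===== PORT A =====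
-- the while-loop: the deque is popped from the right, so we recurse on stack.reverse
-- (head of the argument = element popped), threading last_pop.
def pvPopLoop : List String → String → String → List String × Int
  | [], _, _ => ([], 0)
  | p :: rest, key, last =>
    if p == key then (rest.reverse, 0)
    else if p == "(" && last == ")" then (rest.reverse, 1)
    else pvPopLoop rest key p

def reverse_pop_until_key (stack : List String) (key : String) : List String × Int :=
  pvPopLoop stack.reverse key ""

-- ===== PORT B =====
-- the loop body of Source B: s[i] is in range for i from range(n), so pyGetD is exact here;
-- s[i+1] is guarded by i+1 < n exactly as in the Python condition.
def pvBestStep (s : List String) (key : String) (n : Int)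
    (b : Option (Int × Int)) (i : Int) : Option (Int × Int) :=
  if PySem.List.pyGetD s i "" == key then some (i, 0)
  else if PySem.List.pyGetD s i "" == "(" && decide (i + 1 < n)
          && (PySem.List.pyGetD s (i + 1) "" == ")") then some (i, 1)
  else b

def reverse_pop_until_key_alt (stack : List String) (key : String) : List String × Int :=
  match (PySem.List.pyRange 0 (stack.length : Int) 1).foldl
      (pvBestStep stack key (stack.length : Int)) none with
  | none => ([], 0)
  | some (i, c) => (PySem.List.slice stack none (some i), c)

-- ===== PRECONDITION & SPEC =====
def Spec_reverse_pop_until_key (stack : List String) (key : String) (out : List String × Int) : Prop := out = reverse_pop_until_key_alt stack key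
instance (stack : List String) (key : String) (out : List String × Int) : Decidable (Spec_reverse_pop_until_key stack key out) := by unfold Spec_reverse_pop_until_key; infer_instance

-- ===== CLAIM (what is proved, stated in full; the proofs are below) =====
def Claim_equal_reverse_pop_until_key : Prop := ∀ (stack : List String) (key : String), Dom_reverse_pop_until_key stack key → Spec_reverse_pop_until_key stack key (reverse_pop_until_key stack key)

-- ===== LEMMAS AND PROOFS =====

-- interpret B's best record as the final answer
def pvFinish (s : List String) : Option (Int × Int) → List String × Int
  | none => ([], 0)
  | some (i, c) => (PySem.List.slice s none (some i), c)

-- the invariant: A's popping loop run on the first m elements (context = element m, or the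
-- default "" past the end, matching last_pop's initial '') equals B's fold over range(m).
lemma pvMain (s : List String) (key : String) :
    ∀ m : Nat, m ≤ s.length →
      pvPopLoop ((s.take m).reverse) key (PySem.List.pyGetD s (m : Int) "") =
      pvFinish s ((PySem.List.pyRange 0 (m : Int) 1).foldl (pvBestStep s key s.length) none) := by
  intro m
  induction m with
  | zero =>
    intro _
    simp [PySem.List.pyRange_one_eq_nil, pvPopLoop, pvFinish]
  | succ m ih =>
    intro hm
    have hmlt : m < s.length := by omega
    have hcast : ((m + 1 : Nat) : Int) = (m : Int) + 1 := by push_cast; ring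
    have hrange : PySem.List.pyRange 0 ((m : Int) + 1) 1
        = PySem.List.pyRange 0 (m : Int) 1 ++ [(m : Int)] :=
      PySem.List.pyRange_one_succ_right (by positivity)
    have htake : s.take (m + 1) = s.take m ++ [s[m]] := by
      rw [List.take_add_one]
      simp [List.getElem?_eq_getElem hmlt]
    have hgetm : PySem.List.pyGetD s (m : Int) "" = s[m] := by
      simp [List.getD_eq_getElem?_getD, List.getElem?_eq_getElem hmlt]
    rw [htake, hcast, hrange, List.foldl_append]
    simp only [List.reverse_append, List.reverse_cons, List.reverse_nil, List.nil_append,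
      List.singleton_append, List.foldl_cons, List.foldl_nil]
    by_cases hk : (s[m] == key) = true
    · simp [pvPopLoop, pvBestStep, hgetm, hk, pvFinish, PySem.List.slice_to_natCast]
    · by_cases hlt : m + 1 < s.length
      · have hctx : PySem.List.pyGetD s ((m : Int) + 1) "" = s[m + 1] := by
          rw [show ((m : Int) + 1) = ((m + 1 : Nat) : Int) by push_cast; ring,
            PySem.List.pyGetD_natCast]
          simp [List.getD_eq_getElem?_getD, List.getElem?_eq_getElem hlt]
        have hdec : ((m : Int) + 1 < (s.length : Int)) := by exact_mod_cast hlt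
        by_cases hp : (s[m] == "(" && (s[m + 1] == ")")) = true
        · simp [pvPopLoop, pvBestStep, hgetm, hctx, hk, hdec, hp, pvFinish,
            PySem.List.slice_to_natCast, Bool.and_true]
        · simp only [pvPopLoop, pvBestStep, hgetm, hctx, hk, hdec, hp, Bool.and_true,
            decide_true, Bool.false_eq_true, ite_false]
          rw [← hgetm]
          exact ih (by omega)
      · have hge : s.length ≤ m + 1 := by omega
        have hctx : PySem.List.pyGetD s ((m : Int) + 1) "" = "" := by
          rw [show ((m : Int) + 1) = ((m + 1 : Nat) : Int) by push_cast; ring,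
            PySem.List.pyGetD_natCast]
          simp [List.getD_eq_getElem?_getD, List.getElem?_eq_none hge]
        have hdecb : decide ((m : Int) + 1 < (s.length : Int)) = false :=
          decide_eq_false (by intro h; exact absurd (by exact_mod_cast h : m + 1 < s.length) hlt)
        have hb : ("" == ")") = false := by decide
        simp only [pvPopLoop, pvBestStep, hgetm, hctx, hk, hdecb, hb, Bool.and_false,
          Bool.false_eq_true, ite_false]
        rw [← hgetm]
        exact ih (by omega)

-- ===== VERDICT (by name: the statement is the Claim_ definition above) =====
theorem reverse_pop_until_key_spec : Claim_equal_reverse_pop_until_key := by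
  intro stack key _
  unfold Spec_reverse_pop_until_key reverse_pop_until_key reverse_pop_until_key_alt
  have hctx : PySem.List.pyGetD stack ((stack.length : Nat) : Int) "" = "" := by
    simp [List.getD_eq_getElem?_getD]
  have h := pvMain stack key stack.length le_rfl
  rw [List.take_length, hctx] at h
  rw [h]
  rcases hfold : (PySem.List.pyRange 0 (stack.length : Int) 1).foldl
      (pvBestStep stack key (stack.length : Int)) none with _ | ⟨i, c⟩ <;>
    simp [pvFinish]
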